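-- pv_equiv track=rewrite | github.com/NayanaChandrika99/RLM_aiObservability | apps/demo_agent/fault_injector.py | _resolve_trace_id_column
-- ===== SOURCE A (Python) =====
-- def _resolve_trace_id_column(columns: list[str]) -> str | None:
--     if "context.trace_id" in columns:
--         return "context.trace_id"
--     if "trace_id" in columns:
--         return "trace_id"
--     for name in columns:
--         if name.endswith("trace_id"):
--             return name
--     return None
-- ===== SOURCE B (Python) =====
-- def _resolve_trace_id_column(columns):
--     has_context = False
--     has_trace = False
--     fallback = None
--     for name in columns:
--         if name == "context.trace_id":
--             has_context = True
--         elif name == "trace_id":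
--             has_trace = True
--         if fallback is None and name.endswith("trace_id"):
--             fallback = name
--     if has_context:
--         return "context.trace_id"
--     if has_trace:
--         return "trace_id"
--     return fallback
-- ===== Notes on version B (the rewrite author's own statement) =====
-- stated objective: alternative
-- what changed: Replaced A's three separate passes (two membership tests plus a suffix scan) with a single loop that records flags and the first suffix match, resolving the priority after the loop.
import Mathlib
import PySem

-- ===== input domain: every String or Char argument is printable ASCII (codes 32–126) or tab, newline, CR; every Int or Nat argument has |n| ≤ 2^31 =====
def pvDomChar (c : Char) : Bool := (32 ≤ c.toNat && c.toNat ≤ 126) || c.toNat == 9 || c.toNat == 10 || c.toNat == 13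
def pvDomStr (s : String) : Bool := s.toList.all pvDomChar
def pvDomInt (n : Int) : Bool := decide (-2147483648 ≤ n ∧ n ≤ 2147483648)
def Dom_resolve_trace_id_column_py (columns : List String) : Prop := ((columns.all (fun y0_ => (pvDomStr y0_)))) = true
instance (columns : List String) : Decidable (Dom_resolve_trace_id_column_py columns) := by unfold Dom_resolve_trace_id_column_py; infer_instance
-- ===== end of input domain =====

-- B does one pass recording flags and the first suffix match instead of A's three passes; same cost, different decomposition.

-- ===== PORT A =====
-- the 'for name in columns: if name.endswith(...)' loop of A
def pvALoop (columns : List String) : Option String :=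
  match columns with
  | [] => none
  | name :: rest =>
      if PySem.Str.endswith name "trace_id" then some name else pvALoop rest

def resolve_trace_id_column_py (columns : List String) : Option String :=
  if columns.contains "context.trace_id" then some "context.trace_id"
  else if columns.contains "trace_id" then some "trace_id"
  else pvALoop columns

-- ===== PORT B =====
-- B's single loop over columns, carried as a foldl over (has_context, has_trace, fallback)
def resolve_trace_id_column_py_alt (columns : List String) : Option String :=
  let st := columns.foldl
    (fun s name =>
      let hc := if name == "context.trace_id" then true else s.1
      let ht := if name == "context.trace_id" then s.2.1
                else if name == "trace_id" then true else s.2.1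
      let fb := if s.2.2.isNone && PySem.Str.endswith name "trace_id" then some name else s.2.2
      (hc, ht, fb))
    (false, false, none)
  if st.1 then some "context.trace_id"
  else if st.2.1 then some "trace_id"
  else st.2.2

-- ===== PRECONDITION & SPEC =====
def Spec_resolve_trace_id_column_py (columns : List String) (out : Option String) : Prop := out = resolve_trace_id_column_py_alt columns
instance (columns : List String) (out : Option String) : Decidable (Spec_resolve_trace_id_column_py columns out) := by unfold Spec_resolve_trace_id_column_py; infer_instance

-- ===== CLAIM (what is proved, stated in full; the proofs are below) =====
def Claim_equal_resolve_trace_id_column_py : Prop := ∀ (columns : List String), Dom_resolve_trace_id_column_py columns → Spec_resolve_trace_id_column_py columns (resolve_trace_id_column_py columns)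

-- ===== LEMMAS AND PROOFS =====

-- B's fold computes the two membership flags and the first suffix match (A's three passes)
theorem pvFoldl_inv (cols : List String) (hc ht : Bool) (fb : Option String) :
    cols.foldl
      (fun s name =>
        let hc := if name == "context.trace_id" then true else s.1
        let ht := if name == "context.trace_id" then s.2.1
                  else if name == "trace_id" then true else s.2.1
        let fb := if s.2.2.isNone && PySem.Str.endswith name "trace_id" then some name else s.2.2
        (hc, ht, fb))
      (hc, ht, fb) =
    (hc || cols.contains "context.trace_id",
     ht || cols.contains "trace_id",
     fb.or (pvALoop cols)) := by
  induction cols generalizing hc ht fb with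
  | nil => simp [pvALoop]
  | cons name rest ih =>
    simp only [List.foldl_cons, ih, pvALoop, List.contains_cons]
    refine Prod.ext ?_ (Prod.ext ?_ ?_)
    · by_cases h : name = "context.trace_id"
      · subst h; simp
      · have hb : ("context.trace_id" == name) = false := by simp [Ne.symm h]
        simp [h, hb, Bool.or_assoc]
    · by_cases h : name = "context.trace_id"
      · subst h; simp
      · by_cases h2 : name = "trace_id"
        · subst h2; simp [h]
        · have hb : ("trace_id" == name) = false := by simp [Ne.symm h2]
          simp [h, h2, hb, Bool.or_assoc]
    · cases fb with
      | some x => simp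
      | none =>
        by_cases h : PySem.Chars.endswith name.toList ['t','r','a','c','e','_','i','d'] = true <;>
          simp [h]

-- ===== VERDICT (by name: the statement is the Claim_ definition above) =====
theorem resolve_trace_id_column_py_spec : Claim_equal_resolve_trace_id_column_py := by
  intro columns _
  unfold Spec_resolve_trace_id_column_py resolve_trace_id_column_py resolve_trace_id_column_py_alt
  rw [pvFoldl_inv]
  by_cases h1 : columns.contains "context.trace_id" = true
  · simp [h1]
  · by_cases h2 : columns.contains "trace_id" = true <;>
      simp [h1, h2, Bool.false_or] at * <;> simp [h1, h2]
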